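-- pv_equiv track=rewrite | github.com/pypi-data/pypi-mirror-382 | packages/sumeh/sumeh-0.3.2.tar.gz/sumeh-0.3.2/sumeh/services/utils.py | __transform_date_format_in_pattern
-- ===== SOURCE A (Python) =====
-- def __transform_date_format_in_pattern(date_format):
--     date_patterns = {
--         "DD": "(0[1-9]|[12][0-9]|3[01])",
--         "MM": "(0[1-9]|1[012])",
--         "YYYY": "(19|20)\\d\\d",
--         "YY": "\\d\\d",
--         " ": "\\s",
--         ".": "\\.",
--     }
--
--     date_pattern = date_format
--     for single_format, pattern in date_patterns.items():
--         date_pattern = date_pattern.replace(single_format, pattern)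
--
--     return date_pattern
-- ===== SOURCE B (Python) =====
-- def __transform_date_format_in_pattern(date_format):
--     # token -> regex pattern, tried longest-first so that "YYYY" wins over "YY";
--     # one left-to-right scan, emitted text is never rescanned
--     items = [
--         ("YYYY", "(19|20)\\d\\d"),
--         ("DD", "(0[1-9]|[12][0-9]|3[01])"),
--         ("MM", "(0[1-9]|1[012])"),
--         ("YY", "\\d\\d"),
--         (" ", "\\s"),
--         (".", "\\."),
--     ]
--     out = []
--     i = 0
--     n = len(date_format)
--     while i < n:
--         for token, pattern in items:
--             if date_format.startswith(token, i):
--                 out.append(pattern)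
--                 i += len(token)
--                 break
--         else:
--             out.append(date_format[i])
--             i += 1
--     return "".join(out)
-- ===== Notes on version B (the rewrite author's own statement) =====
-- stated objective: alternative
-- what changed: A runs six sequential whole-string str.replace passes (one per date token); B makes a single left-to-right scan that tries the tokens longest-first at each position (so YYYY wins over YY) and emits each replacement exactly once, never rescanning emitted text.
import Mathlib
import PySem

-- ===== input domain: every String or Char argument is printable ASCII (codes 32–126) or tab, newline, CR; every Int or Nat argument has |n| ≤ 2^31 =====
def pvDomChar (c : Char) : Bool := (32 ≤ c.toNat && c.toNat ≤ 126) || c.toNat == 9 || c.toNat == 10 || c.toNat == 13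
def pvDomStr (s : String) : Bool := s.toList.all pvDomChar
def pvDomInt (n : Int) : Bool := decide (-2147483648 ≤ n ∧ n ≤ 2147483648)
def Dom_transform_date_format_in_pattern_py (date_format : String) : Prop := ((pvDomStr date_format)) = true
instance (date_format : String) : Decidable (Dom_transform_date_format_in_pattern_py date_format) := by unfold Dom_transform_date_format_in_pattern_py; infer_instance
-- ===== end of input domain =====

set_option maxRecDepth 8192

-- B replaces A's six sequential whole-string .replace passes by a single left-to-right scan
-- that tries the tokens longest-first and never rescans emitted replacement text (objective: alternative).

-- ===== PORT A =====
-- A: a dict of token → regex pattern, then one str.replace pass per token, in dict order.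
def transform_date_format_in_pattern_py (date_format : String) : String :=
  let date_patterns : List (String × String) :=
    [("DD", "(0[1-9]|[12][0-9]|3[01])"),
     ("MM", "(0[1-9]|1[012])"),
     ("YYYY", "(19|20)\\d\\d"),
     ("YY", "\\d\\d"),
     (" ", "\\s"),
     (".", "\\.")]
  date_patterns.foldl (fun date_pattern kv => PySem.Str.replace date_pattern kv.1 kv.2) date_format

-- ===== PORT B =====
-- B (from Source B): the token → pattern items, longest token first; one scan, at each position try
-- the tokens in that order (the inner for/else), emit the pattern or the current character.
def tdfMatch (items : List (String × String)) (s : List Char) : Option (List Char × Nat) :=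
  match items with
  | [] => none
  | kv :: rest =>
      if kv.1.toList.isPrefixOf s then some (kv.2.toList, kv.1.toList.length)
      else tdfMatch rest s

-- the while loop of Source B: fuel = n - i, the remaining list = date_format[i:]
def tdfGo (items : List (String × String)) : Nat → List Char → List Char
  | 0, _ => []
  | _ + 1, [] => []
  | fuel + 1, c :: t =>
      match tdfMatch items (c :: t) with
      | some pk => pk.1 ++ tdfGo items fuel ((c :: t).drop pk.2)
      | none => c :: tdfGo items fuel t

def transform_date_format_in_pattern_py_alt (date_format : String) : String :=
  let items : List (String × String) :=
    [("YYYY", "(19|20)\\d\\d"),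
     ("DD", "(0[1-9]|[12][0-9]|3[01])"),
     ("MM", "(0[1-9]|1[012])"),
     ("YY", "\\d\\d"),
     (" ", "\\s"),
     (".", "\\.")]
  String.ofList (tdfGo items date_format.toList.length date_format.toList)

-- ===== PRECONDITION & SPEC =====
def Spec_transform_date_format_in_pattern_py (date_format : String) (out : String) : Prop := out = transform_date_format_in_pattern_py_alt date_format
instance (date_format : String) (out : String) : Decidable (Spec_transform_date_format_in_pattern_py date_format out) := by unfold Spec_transform_date_format_in_pattern_py; infer_instance

-- ===== CLAIM (what is proved, stated in full; the proofs are below) =====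
def Claim_equal_transform_date_format_in_pattern_py : Prop := ∀ (date_format : String), Dom_transform_date_format_in_pattern_py date_format → Spec_transform_date_format_in_pattern_py date_format (transform_date_format_in_pattern_py date_format)

-- ===== LEMMAS AND PROOFS =====

-- the six replacement patterns, as character lists
def pvDD : List Char := ['(', '0', '[', '1', '-', '9', ']', '|', '[', '1', '2', ']', '[', '0', '-', '9', ']', '|', '3', '[', '0', '1', ']', ')']
def pvMM : List Char := ['(', '0', '[', '1', '-', '9', ']', '|', '1', '[', '0', '1', '2', ']', ')']
def pvY4 : List Char := ['(', '1', '9', '|', '2', '0', ')', '\\', 'd', '\\', 'd']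
def pvYY : List Char := ['\\', 'd', '\\', 'd']
def pvSP : List Char := ['\\', 's']
def pvDOT : List Char := ['\\', '.']

-- A's six passes, one definition per pass, on character lists
def rDD (l : List Char) : List Char := PySem.Chars.replace l ['D','D'] pvDD
def rMM (l : List Char) : List Char := PySem.Chars.replace l ['M','M'] pvMM
def rY4 (l : List Char) : List Char := PySem.Chars.replace l ['Y','Y','Y','Y'] pvY4
def rYY (l : List Char) : List Char := PySem.Chars.replace l ['Y','Y'] pvYY
def rSP (l : List Char) : List Char := PySem.Chars.replace l [' '] pvSP
def rDOT (l : List Char) : List Char := PySem.Chars.replace l ['.'] pvDOT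
def pvA (l : List Char) : List Char := rDOT (rSP (rYY (rY4 (rMM (rDD l)))))

-- B's sorted item list, evaluated
def pvI : List (String × String) :=
  [("YYYY", "(19|20)\\d\\d"),
   ("DD", "(0[1-9]|[12][0-9]|3[01])"),
   ("MM", "(0[1-9]|1[012])"),
   ("YY", "\\d\\d"),
   (" ", "\\s"),
   (".", "\\.")]

def pvB (l : List Char) : List Char := tdfGo pvI l.length l

lemma pvA_eq (df : String) : (transform_date_format_in_pattern_py df).toList = pvA df.toList := by
  simp only [transform_date_format_in_pattern_py, List.foldl_cons, List.foldl_nil,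
    PySem.Str.toList_replace]
  rfl

lemma pvB_eq (df : String) : (transform_date_format_in_pattern_py_alt df).toList = pvB df.toList := by
  simp only [transform_date_format_in_pattern_py_alt]
  simp [pvB, pvI]

-- ---- generic facts about PySem.Chars.replace ----

lemma pvGo_acc (o n : List Char) : ∀ (fuel : Nat) (l acc : List Char),
    PySem.Chars.replace.go o n fuel l acc = acc.reverse ++ PySem.Chars.replace.go o n fuel l [] := by
  intro fuel
  induction fuel with
  | zero => intro l acc; simp [PySem.Chars.replace.go]
  | succ f ih =>
    intro l acc
    cases l with
    | nil => simp [PySem.Chars.replace.go]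
    | cons c t =>
      simp only [PySem.Chars.replace.go]
      split_ifs with hp
      · rw [ih _ (n.reverse ++ acc), ih _ (n.reverse ++ [])]
        simp
      · rw [ih t (c :: acc), ih t [c]]
        simp

lemma pvGo_fuel (oh : Char) (o' n : List Char) :
    ∀ (f1 f2 : Nat) (l : List Char), l.length ≤ f1 → l.length ≤ f2 →
      PySem.Chars.replace.go (oh::o') n f1 l [] = PySem.Chars.replace.go (oh::o') n f2 l [] := by
  intro f1
  induction f1 with
  | zero =>
    intro f2 l h1 _
    have hl : l = [] := List.eq_nil_of_length_eq_zero (Nat.le_zero.mp h1)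
    subst hl
    cases f2 <;> simp [PySem.Chars.replace.go]
  | succ f ih =>
    intro f2 l h1 h2
    cases l with
    | nil => cases f2 <;> simp [PySem.Chars.replace.go]
    | cons c t =>
      cases f2 with
      | zero => simp at h2
      | succ g =>
        simp only [PySem.Chars.replace.go]
        have h1' : t.length ≤ f := by simp at h1; omega
        have h2' : t.length ≤ g := by simp at h2; omega
        split_ifs with hp
        · rw [pvGo_acc (oh::o') n f _ (n.reverse ++ []), pvGo_acc (oh::o') n g _ (n.reverse ++ [])]
          congr 1
          apply ih
          · simp [List.length_drop]; omega
          · simp [List.length_drop]; omega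
        · rw [pvGo_acc (oh::o') n f t [c], pvGo_acc (oh::o') n g t [c]]
          congr 1
          exact ih g t h1' h2'

lemma pvRep_nil (o n : List Char) (ho : o ≠ []) : PySem.Chars.replace [] o n = [] := by
  cases o with
  | nil => exact absurd rfl ho
  | cons a as => simp [PySem.Chars.replace, PySem.Chars.replace.go]

lemma pvRep_skip (oh : Char) (o' n : List Char) (c : Char) (t : List Char)
    (hc : (oh::o').isPrefixOf (c::t) = false) :
    PySem.Chars.replace (c::t) (oh::o') n = c :: PySem.Chars.replace t (oh::o') n := by
  simp only [PySem.Chars.replace, List.isEmpty_cons, List.length_cons, Bool.false_eq_true,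
    if_false]
  simp only [PySem.Chars.replace.go, hc, Bool.false_eq_true, if_false]
  rw [pvGo_acc]
  simp

lemma pvPrefix_false_of_head (oh : Char) (o' l : List Char) (h : l.head? ≠ some oh) :
    (oh::o').isPrefixOf l = false := by
  cases l with
  | nil => rfl
  | cons c t =>
    have hne : (oh == c) = false := by
      simp only [List.head?_cons, ne_eq, Option.some.injEq] at h
      simp [beq_eq_false_iff_ne]
      exact fun e => h e.symm
    simp [List.isPrefixOf, hne]

lemma pvRep_skip' (c oh : Char) (o' n t : List Char) (hc : c ≠ oh) :
    PySem.Chars.replace (c::t) (oh::o') n = c :: PySem.Chars.replace t (oh::o') n :=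
  pvRep_skip oh o' n c t (pvPrefix_false_of_head oh o' (c::t) (by
    simp only [List.head?_cons, ne_eq, Option.some.injEq]
    exact fun e => hc e))

lemma pvRep_match (oh : Char) (o' n l : List Char) (hp : (oh::o').isPrefixOf l = true) :
    PySem.Chars.replace l (oh::o') n
      = n ++ PySem.Chars.replace (l.drop (o'.length + 1)) (oh::o') n := by
  cases l with
  | nil => exact Bool.noConfusion hp
  | cons c t =>
    simp only [PySem.Chars.replace, List.isEmpty_cons, List.length_cons, Bool.false_eq_true,
      if_false]
    simp only [PySem.Chars.replace.go, hp, if_true]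
    rw [pvGo_acc]
    simp only [List.append_nil, List.reverse_reverse, List.length_cons]
    congr 1
    rw [pvGo_fuel oh o' n t.length ((c::t).drop (o'.length+1)).length _
          (by simp only [List.length_drop, List.length_cons]; omega) le_rfl]

lemma pvPrefix_head (oh : Char) (o' : List Char) (a : Char) (t : List Char)
    (hp : (oh::o').isPrefixOf (a::t) = true) : a = oh := by
  simp only [List.isPrefixOf, Bool.and_eq_true, beq_iff_eq] at hp
  exact hp.1.symm

lemma pvRep_pass (oh : Char) (o' n : List Char) :
    ∀ (u v : List Char), (∀ a ∈ u, a ≠ oh) →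
      PySem.Chars.replace (u ++ v) (oh::o') n = u ++ PySem.Chars.replace v (oh::o') n := by
  intro u
  induction u with
  | nil => intro v _; rfl
  | cons a u' ih =>
    intro v hu
    simp only [List.cons_append]
    rw [pvRep_skip' a oh o' n (u' ++ v) (hu a (by simp))]
    rw [ih v (fun b hb => hu b (List.mem_cons_of_mem _ hb))]

lemma pvRep_head_iff (oh : Char) (o' n l : List Char) (c : Char)
    (hc1 : c ≠ oh) (hn1 : n.head? ≠ some c) (hn2 : n ≠ []) :
    ((PySem.Chars.replace l (oh::o') n).head? = some c) ↔ (l.head? = some c) := by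
  cases l with
  | nil => rw [pvRep_nil _ _ (by simp)]
  | cons a t =>
    by_cases hp : (oh::o').isPrefixOf (a::t) = true
    · have ha : a = oh := pvPrefix_head oh o' a t hp
      rw [pvRep_match _ _ _ _ hp]
      cases n with
      | nil => exact absurd rfl hn2
      | cons nh n' =>
        simp only [List.cons_append, List.head?_cons]
        have hnh : nh ≠ c := by intro e; apply hn1; simp [e]
        have hac : a ≠ c := fun e => hc1 (e ▸ ha)
        simp [hnh, hac]
    · simp only [Bool.not_eq_true] at hp
      rw [pvRep_skip _ _ _ _ _ hp]
      simp

lemma pvRep_head_skip (oh : Char) (o' n l : List Char) (h : l.head? ≠ some oh) :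
    (PySem.Chars.replace l (oh::o') n).head? = l.head? := by
  cases l with
  | nil => rw [pvRep_nil _ _ (by simp)]
  | cons a t =>
    rw [pvRep_skip _ _ _ _ _ (pvPrefix_false_of_head oh o' (a::t) h)]
    simp

-- ---- pass-through of already-emitted text through the later passes of A ----

lemma L_SP (u v : List Char) (hP : ∀ a ∈ u, a ≠ '.') : rDOT (u ++ v) = u ++ rDOT v :=
  pvRep_pass '.' [] pvDOT u v hP

lemma L_YY (u v : List Char) (hS : ∀ a ∈ u, a ≠ ' ') (hP : ∀ a ∈ u, a ≠ '.') :
    rDOT (rSP (u ++ v)) = u ++ rDOT (rSP v) := by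
  unfold rSP
  rw [pvRep_pass ' ' [] pvSP u v hS]
  exact L_SP u _ hP

lemma L_Y4 (u v : List Char) (hY : ∀ a ∈ u, a ≠ 'Y') (hS : ∀ a ∈ u, a ≠ ' ')
    (hP : ∀ a ∈ u, a ≠ '.') :
    rDOT (rSP (rYY (u ++ v))) = u ++ rDOT (rSP (rYY v)) := by
  unfold rYY
  rw [pvRep_pass 'Y' ['Y'] pvYY u v hY]
  exact L_YY u _ hS hP

lemma L_MM (u v : List Char) (hY : ∀ a ∈ u, a ≠ 'Y') (hS : ∀ a ∈ u, a ≠ ' ')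
    (hP : ∀ a ∈ u, a ≠ '.') :
    rDOT (rSP (rYY (rY4 (u ++ v)))) = u ++ rDOT (rSP (rYY (rY4 v))) := by
  unfold rY4
  rw [pvRep_pass 'Y' ['Y','Y','Y'] pvY4 u v hY]
  exact L_Y4 u _ hY hS hP

lemma L_DD (u v : List Char) (hM : ∀ a ∈ u, a ≠ 'M') (hY : ∀ a ∈ u, a ≠ 'Y')
    (hS : ∀ a ∈ u, a ≠ ' ') (hP : ∀ a ∈ u, a ≠ '.') :
    rDOT (rSP (rYY (rY4 (rMM (u ++ v))))) = u ++ rDOT (rSP (rYY (rY4 (rMM v)))) := by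
  unfold rMM
  rw [pvRep_pass 'M' ['M'] pvMM u v hM]
  exact L_MM u _ hY hS hP

-- head of rMM (rDD t) is 'Y' exactly when t starts with 'Y'
lemma pvXhead (t : List Char) :
    ((rMM (rDD t)).head? = some 'Y') ↔ t.head? = some 'Y' := by
  unfold rMM rDD
  rw [pvRep_head_iff 'M' ['M'] pvMM _ 'Y' (by decide) (by decide) (by decide),
      pvRep_head_iff 'D' ['D'] pvDD _ 'Y' (by decide) (by decide) (by decide)]

lemma pvDDhead (t : List Char) :
    ((rDD t).head? = some 'M') ↔ t.head? = some 'M' := by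
  unfold rDD
  rw [pvRep_head_iff 'D' ['D'] pvDD _ 'M' (by decide) (by decide) (by decide)]

-- ---- A's behaviour on each shape of the head of the input ----

lemma A_nil : pvA [] = [] := by
  unfold pvA rDD rMM rY4 rYY rSP rDOT
  rw [pvRep_nil _ _ (by simp), pvRep_nil _ _ (by simp), pvRep_nil _ _ (by simp),
     pvRep_nil _ _ (by simp), pvRep_nil _ _ (by simp), pvRep_nil _ _ (by simp)]

lemma A_DD (t : List Char) : pvA ('D'::'D'::t) = pvDD ++ pvA t := by
  unfold pvA
  have h1 : rDD ('D'::'D'::t) = pvDD ++ rDD t := by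
    unfold rDD
    rw [pvRep_match 'D' ['D'] pvDD ('D'::'D'::t) (by simp [List.isPrefixOf])]
    rfl
  rw [h1, L_DD pvDD _ (by simp [pvDD]) (by simp [pvDD]) (by simp [pvDD]) (by simp [pvDD])]

lemma A_MM (t : List Char) : pvA ('M'::'M'::t) = pvMM ++ pvA t := by
  unfold pvA
  have h0 : rDD ('M'::'M'::t) = 'M'::'M'::rDD t := by
    unfold rDD
    rw [pvRep_skip' 'M' 'D' _ _ _ (by decide), pvRep_skip' 'M' 'D' _ _ _ (by decide)]
  have h1 : rMM ('M'::'M'::rDD t) = pvMM ++ rMM (rDD t) := by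
    unfold rMM
    rw [pvRep_match 'M' ['M'] pvMM _ (by simp [List.isPrefixOf])]
    rfl
  rw [h0, h1, L_MM pvMM _ (by simp [pvMM]) (by simp [pvMM]) (by simp [pvMM])]

lemma A_Y4 (t : List Char) : pvA ('Y'::'Y'::'Y'::'Y'::t) = pvY4 ++ pvA t := by
  unfold pvA
  have h0 : rDD ('Y'::'Y'::'Y'::'Y'::t) = 'Y'::'Y'::'Y'::'Y'::rDD t := by
    unfold rDD
    rw [pvRep_skip' 'Y' 'D' _ _ _ (by decide), pvRep_skip' 'Y' 'D' _ _ _ (by decide),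
       pvRep_skip' 'Y' 'D' _ _ _ (by decide), pvRep_skip' 'Y' 'D' _ _ _ (by decide)]
  have h1 : rMM ('Y'::'Y'::'Y'::'Y'::rDD t) = 'Y'::'Y'::'Y'::'Y'::rMM (rDD t) := by
    unfold rMM
    rw [pvRep_skip' 'Y' 'M' _ _ _ (by decide), pvRep_skip' 'Y' 'M' _ _ _ (by decide),
       pvRep_skip' 'Y' 'M' _ _ _ (by decide), pvRep_skip' 'Y' 'M' _ _ _ (by decide)]
  have h2 : rY4 ('Y'::'Y'::'Y'::'Y'::rMM (rDD t)) = pvY4 ++ rY4 (rMM (rDD t)) := by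
    unfold rY4
    rw [pvRep_match 'Y' ['Y','Y','Y'] pvY4 _ (by simp [List.isPrefixOf])]
    rfl
  rw [h0, h1, h2, L_Y4 pvY4 _ (by simp [pvY4]) (by simp [pvY4]) (by simp [pvY4])]

lemma A_YY (t : List Char) (h : t.head? ≠ some 'Y') :
    pvA ('Y'::'Y'::t) = pvYY ++ pvA t := by
  unfold pvA
  have hX : (rMM (rDD t)).head? ≠ some 'Y' := fun hx => h ((pvXhead t).mp hx)
  have h0 : rDD ('Y'::'Y'::t) = 'Y'::'Y'::rDD t := by
    unfold rDD
    rw [pvRep_skip' 'Y' 'D' _ _ _ (by decide), pvRep_skip' 'Y' 'D' _ _ _ (by decide)]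
  have h1 : rMM ('Y'::'Y'::rDD t) = 'Y'::'Y'::rMM (rDD t) := by
    unfold rMM
    rw [pvRep_skip' 'Y' 'M' _ _ _ (by decide), pvRep_skip' 'Y' 'M' _ _ _ (by decide)]
  have h2 : rY4 ('Y'::'Y'::rMM (rDD t)) = 'Y'::'Y'::rY4 (rMM (rDD t)) := by
    unfold rY4
    rw [pvRep_skip _ _ _ _ _ (by
          have hf := pvPrefix_false_of_head 'Y' ['Y'] (rMM (rDD t)) hX
          simp [List.isPrefixOf, hf]),
        pvRep_skip _ _ _ _ _ (by
          have hf := pvPrefix_false_of_head 'Y' ['Y','Y'] (rMM (rDD t)) hX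
          simp [List.isPrefixOf, hf])]
  have h3 : rYY ('Y'::'Y'::rY4 (rMM (rDD t))) = pvYY ++ rYY (rY4 (rMM (rDD t))) := by
    unfold rYY
    rw [pvRep_match 'Y' ['Y'] pvYY _ (by simp [List.isPrefixOf])]
    rfl
  rw [h0, h1, h2, h3, L_YY pvYY _ (by simp [pvYY]) (by simp [pvYY])]

lemma A_YYY (t : List Char) (h : t.head? ≠ some 'Y') :
    pvA ('Y'::'Y'::'Y'::t) = pvYY ++ 'Y' :: pvA t := by
  unfold pvA
  have hX : (rMM (rDD t)).head? ≠ some 'Y' := fun hx => h ((pvXhead t).mp hx)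
  have h0 : rDD ('Y'::'Y'::'Y'::t) = 'Y'::'Y'::'Y'::rDD t := by
    unfold rDD
    rw [pvRep_skip' 'Y' 'D' _ _ _ (by decide), pvRep_skip' 'Y' 'D' _ _ _ (by decide),
       pvRep_skip' 'Y' 'D' _ _ _ (by decide)]
  have h1 : rMM ('Y'::'Y'::'Y'::rDD t) = 'Y'::'Y'::'Y'::rMM (rDD t) := by
    unfold rMM
    rw [pvRep_skip' 'Y' 'M' _ _ _ (by decide), pvRep_skip' 'Y' 'M' _ _ _ (by decide),
       pvRep_skip' 'Y' 'M' _ _ _ (by decide)]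
  have h2 : rY4 ('Y'::'Y'::'Y'::rMM (rDD t)) = 'Y'::'Y'::'Y'::rY4 (rMM (rDD t)) := by
    unfold rY4
    rw [pvRep_skip _ _ _ _ _ (by
          have hf := pvPrefix_false_of_head 'Y' [] (rMM (rDD t)) hX
          simp [List.isPrefixOf, hf]),
        pvRep_skip _ _ _ _ _ (by
          have hf := pvPrefix_false_of_head 'Y' ['Y'] (rMM (rDD t)) hX
          simp [List.isPrefixOf, hf]),
        pvRep_skip _ _ _ _ _ (by
          have hf := pvPrefix_false_of_head 'Y' ['Y','Y'] (rMM (rDD t)) hX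
          simp [List.isPrefixOf, hf])]
  have hY4X : (rY4 (rMM (rDD t))).head? = (rMM (rDD t)).head? :=
    pvRep_head_skip 'Y' ['Y','Y','Y'] pvY4 _ hX
  have h3 : rYY ('Y'::'Y'::'Y'::rY4 (rMM (rDD t)))
      = pvYY ++ rYY ('Y'::rY4 (rMM (rDD t))) := by
    unfold rYY
    rw [pvRep_match 'Y' ['Y'] pvYY _ (by simp [List.isPrefixOf])]
    rfl
  have h4 : rYY ('Y'::rY4 (rMM (rDD t))) = 'Y' :: rYY (rY4 (rMM (rDD t))) := by
    unfold rYY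
    rw [pvRep_skip _ _ _ _ _ (by
          have hf := pvPrefix_false_of_head 'Y' [] (rY4 (rMM (rDD t))) (by rw [hY4X]; exact hX)
          simp [List.isPrefixOf, hf])]
  rw [h0, h1, h2, h3, h4]
  have : pvYY ++ 'Y' :: rYY (rY4 (rMM (rDD t))) = (pvYY ++ ['Y']) ++ rYY (rY4 (rMM (rDD t))) := by
    simp
  rw [this, L_YY (pvYY ++ ['Y']) _ (by simp [pvYY]) (by simp [pvYY])]
  simp

lemma A_Y1 (t : List Char) (h : t.head? ≠ some 'Y') :
    pvA ('Y'::t) = 'Y' :: pvA t := by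
  unfold pvA
  have hX : (rMM (rDD t)).head? ≠ some 'Y' := fun hx => h ((pvXhead t).mp hx)
  have h0 : rDD ('Y'::t) = 'Y'::rDD t := by
    unfold rDD; rw [pvRep_skip' 'Y' 'D' _ _ _ (by decide)]
  have h1 : rMM ('Y'::rDD t) = 'Y'::rMM (rDD t) := by
    unfold rMM; rw [pvRep_skip' 'Y' 'M' _ _ _ (by decide)]
  have h2 : rY4 ('Y'::rMM (rDD t)) = 'Y'::rY4 (rMM (rDD t)) := by
    unfold rY4
    rw [pvRep_skip _ _ _ _ _ (by
          have hf := pvPrefix_false_of_head 'Y' ['Y','Y'] (rMM (rDD t)) hX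
          simp [List.isPrefixOf, hf])]
  have hY4X : (rY4 (rMM (rDD t))).head? = (rMM (rDD t)).head? :=
    pvRep_head_skip 'Y' ['Y','Y','Y'] pvY4 _ hX
  have h3 : rYY ('Y'::rY4 (rMM (rDD t))) = 'Y' :: rYY (rY4 (rMM (rDD t))) := by
    unfold rYY
    rw [pvRep_skip _ _ _ _ _ (by
          have hf := pvPrefix_false_of_head 'Y' [] (rY4 (rMM (rDD t))) (by rw [hY4X]; exact hX)
          simp [List.isPrefixOf, hf])]
  have h4 : rSP ('Y'::rYY (rY4 (rMM (rDD t)))) = 'Y' :: rSP (rYY (rY4 (rMM (rDD t)))) := by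
    unfold rSP; rw [pvRep_skip' 'Y' ' ' _ _ _ (by decide)]
  have h5 : rDOT ('Y'::rSP (rYY (rY4 (rMM (rDD t))))) = 'Y' :: rDOT (rSP (rYY (rY4 (rMM (rDD t))))) := by
    unfold rDOT; rw [pvRep_skip' 'Y' '.' _ _ _ (by decide)]
  rw [h0, h1, h2, h3, h4, h5]

lemma A_D1 (t : List Char) (h : t.head? ≠ some 'D') :
    pvA ('D'::t) = 'D' :: pvA t := by
  unfold pvA
  have h0 : rDD ('D'::t) = 'D'::rDD t := by
    unfold rDD
    rw [pvRep_skip _ _ _ _ _ (by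
          have hf := pvPrefix_false_of_head 'D' [] t h
          simp [List.isPrefixOf, hf])]
  have h1 : rMM ('D'::rDD t) = 'D'::rMM (rDD t) := by
    unfold rMM; rw [pvRep_skip' 'D' 'M' _ _ _ (by decide)]
  have h2 : rY4 ('D'::rMM (rDD t)) = 'D'::rY4 (rMM (rDD t)) := by
    unfold rY4; rw [pvRep_skip' 'D' 'Y' _ _ _ (by decide)]
  have h3 : rYY ('D'::rY4 (rMM (rDD t))) = 'D' :: rYY (rY4 (rMM (rDD t))) := by
    unfold rYY; rw [pvRep_skip' 'D' 'Y' _ _ _ (by decide)]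
  have h4 : rSP ('D'::rYY (rY4 (rMM (rDD t)))) = 'D' :: rSP (rYY (rY4 (rMM (rDD t)))) := by
    unfold rSP; rw [pvRep_skip' 'D' ' ' _ _ _ (by decide)]
  have h5 : rDOT ('D'::rSP (rYY (rY4 (rMM (rDD t))))) = 'D' :: rDOT (rSP (rYY (rY4 (rMM (rDD t))))) := by
    unfold rDOT; rw [pvRep_skip' 'D' '.' _ _ _ (by decide)]
  rw [h0, h1, h2, h3, h4, h5]

lemma A_M1 (t : List Char) (h : t.head? ≠ some 'M') :
    pvA ('M'::t) = 'M' :: pvA t := by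
  unfold pvA
  have hD : (rDD t).head? ≠ some 'M' := fun hx => h ((pvDDhead t).mp hx)
  have h0 : rDD ('M'::t) = 'M'::rDD t := by
    unfold rDD; rw [pvRep_skip' 'M' 'D' _ _ _ (by decide)]
  have h1 : rMM ('M'::rDD t) = 'M'::rMM (rDD t) := by
    unfold rMM
    rw [pvRep_skip _ _ _ _ _ (by
          have hf := pvPrefix_false_of_head 'M' [] (rDD t) hD
          simp [List.isPrefixOf, hf])]
  have h2 : rY4 ('M'::rMM (rDD t)) = 'M'::rY4 (rMM (rDD t)) := by
    unfold rY4; rw [pvRep_skip' 'M' 'Y' _ _ _ (by decide)]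
  have h3 : rYY ('M'::rY4 (rMM (rDD t))) = 'M' :: rYY (rY4 (rMM (rDD t))) := by
    unfold rYY; rw [pvRep_skip' 'M' 'Y' _ _ _ (by decide)]
  have h4 : rSP ('M'::rYY (rY4 (rMM (rDD t)))) = 'M' :: rSP (rYY (rY4 (rMM (rDD t)))) := by
    unfold rSP; rw [pvRep_skip' 'M' ' ' _ _ _ (by decide)]
  have h5 : rDOT ('M'::rSP (rYY (rY4 (rMM (rDD t))))) = 'M' :: rDOT (rSP (rYY (rY4 (rMM (rDD t))))) := by
    unfold rDOT; rw [pvRep_skip' 'M' '.' _ _ _ (by decide)]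
  rw [h0, h1, h2, h3, h4, h5]

lemma A_SP (t : List Char) : pvA (' '::t) = pvSP ++ pvA t := by
  unfold pvA
  have h0 : rDD (' '::t) = ' '::rDD t := by
    unfold rDD; rw [pvRep_skip' ' ' 'D' _ _ _ (by decide)]
  have h1 : rMM (' '::rDD t) = ' '::rMM (rDD t) := by
    unfold rMM; rw [pvRep_skip' ' ' 'M' _ _ _ (by decide)]
  have h2 : rY4 (' '::rMM (rDD t)) = ' '::rY4 (rMM (rDD t)) := by
    unfold rY4; rw [pvRep_skip' ' ' 'Y' _ _ _ (by decide)]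
  have h3 : rYY (' '::rY4 (rMM (rDD t))) = ' ' :: rYY (rY4 (rMM (rDD t))) := by
    unfold rYY; rw [pvRep_skip' ' ' 'Y' _ _ _ (by decide)]
  have h4 : rSP (' '::rYY (rY4 (rMM (rDD t)))) = pvSP ++ rSP (rYY (rY4 (rMM (rDD t)))) := by
    unfold rSP
    rw [pvRep_match ' ' [] pvSP _ (by simp [List.isPrefixOf])]
    rfl
  rw [h0, h1, h2, h3, h4, L_SP pvSP _ (by simp [pvSP])]

lemma A_DOT (t : List Char) : pvA ('.'::t) = pvDOT ++ pvA t := by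
  unfold pvA
  have h0 : rDD ('.'::t) = '.'::rDD t := by
    unfold rDD; rw [pvRep_skip' '.' 'D' _ _ _ (by decide)]
  have h1 : rMM ('.'::rDD t) = '.'::rMM (rDD t) := by
    unfold rMM; rw [pvRep_skip' '.' 'M' _ _ _ (by decide)]
  have h2 : rY4 ('.'::rMM (rDD t)) = '.'::rY4 (rMM (rDD t)) := by
    unfold rY4; rw [pvRep_skip' '.' 'Y' _ _ _ (by decide)]
  have h3 : rYY ('.'::rY4 (rMM (rDD t))) = '.' :: rYY (rY4 (rMM (rDD t))) := by
    unfold rYY; rw [pvRep_skip' '.' 'Y' _ _ _ (by decide)]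
  have h4 : rSP ('.'::rYY (rY4 (rMM (rDD t)))) = '.' :: rSP (rYY (rY4 (rMM (rDD t)))) := by
    unfold rSP; rw [pvRep_skip' '.' ' ' _ _ _ (by decide)]
  have h5 : rDOT ('.'::rSP (rYY (rY4 (rMM (rDD t))))) = pvDOT ++ rDOT (rSP (rYY (rY4 (rMM (rDD t))))) := by
    unfold rDOT
    rw [pvRep_match '.' [] pvDOT _ (by simp [List.isPrefixOf])]
    rfl
  rw [h0, h1, h2, h3, h4, h5]

lemma A_other (c : Char) (t : List Char) (hD : c ≠ 'D') (hM : c ≠ 'M') (hY : c ≠ 'Y')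
    (hS : c ≠ ' ') (hP : c ≠ '.') : pvA (c::t) = c :: pvA t := by
  unfold pvA
  have h0 : rDD (c::t) = c::rDD t := by
    unfold rDD; rw [pvRep_skip' c 'D' _ _ _ hD]
  have h1 : rMM (c::rDD t) = c::rMM (rDD t) := by
    unfold rMM; rw [pvRep_skip' c 'M' _ _ _ hM]
  have h2 : rY4 (c::rMM (rDD t)) = c::rY4 (rMM (rDD t)) := by
    unfold rY4; rw [pvRep_skip' c 'Y' _ _ _ hY]
  have h3 : rYY (c::rY4 (rMM (rDD t))) = c :: rYY (rY4 (rMM (rDD t))) := by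
    unfold rYY; rw [pvRep_skip' c 'Y' _ _ _ hY]
  have h4 : rSP (c::rYY (rY4 (rMM (rDD t)))) = c :: rSP (rYY (rY4 (rMM (rDD t)))) := by
    unfold rSP; rw [pvRep_skip' c ' ' _ _ _ hS]
  have h5 : rDOT (c::rSP (rYY (rY4 (rMM (rDD t))))) = c :: rDOT (rSP (rYY (rY4 (rMM (rDD t))))) := by
    unfold rDOT; rw [pvRep_skip' c '.' _ _ _ hP]
  rw [h0, h1, h2, h3, h4, h5]

-- ---- B's behaviour on the same shapes ----

lemma tdfGo_some (items : List (String × String)) (fuel : Nat) (c : Char) (t p : List Char)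
    (k : Nat) (hm : tdfMatch items (c::t) = some (p, k)) :
    tdfGo items (fuel+1) (c::t) = p ++ tdfGo items fuel ((c::t).drop k) := by
  have e : tdfGo items (fuel+1) (c::t)
      = (match tdfMatch items (c::t) with
         | some pk => pk.1 ++ tdfGo items fuel ((c::t).drop pk.2)
         | none => c :: tdfGo items fuel t) := rfl
  rw [e, hm]

lemma tdfGo_none (items : List (String × String)) (fuel : Nat) (c : Char) (t : List Char)
    (hm : tdfMatch items (c::t) = none) :
    tdfGo items (fuel+1) (c::t) = c :: tdfGo items fuel t := by
  have e : tdfGo items (fuel+1) (c::t)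
      = (match tdfMatch items (c::t) with
         | some pk => pk.1 ++ tdfGo items fuel ((c::t).drop pk.2)
         | none => c :: tdfGo items fuel t) := rfl
  rw [e, hm]

lemma pvMatch_k (l p : List Char) (k : Nat) (h : tdfMatch pvI l = some (p, k)) : 1 ≤ k := by
  simp only [pvI, tdfMatch] at h
  split_ifs at h <;> simp_all
  all_goals omega

lemma pvB_fuel : ∀ (f1 f2 : Nat) (l : List Char), l.length ≤ f1 → l.length ≤ f2 →
    tdfGo pvI f1 l = tdfGo pvI f2 l := by
  intro f1
  induction f1 with
  | zero =>
    intro f2 l h1 _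
    have hl : l = [] := List.eq_nil_of_length_eq_zero (Nat.le_zero.mp h1)
    subst hl
    cases f2 <;> rfl
  | succ f ih =>
    intro f2 l h1 h2
    cases l with
    | nil => cases f2 <;> rfl
    | cons c t =>
      cases f2 with
      | zero => simp at h2
      | succ g =>
        have h1' : t.length ≤ f := by simp at h1; omega
        have h2' : t.length ≤ g := by simp at h2; omega
        cases hm : tdfMatch pvI (c::t) with
        | none =>
          rw [tdfGo_none _ _ _ _ hm, tdfGo_none _ _ _ _ hm, ih g t h1' h2']
        | some pk =>
          obtain ⟨p, k⟩ := pk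
          have hk := pvMatch_k _ _ _ hm
          rw [tdfGo_some _ _ _ _ _ _ hm, tdfGo_some _ _ _ _ _ _ hm]
          congr 1
          apply ih
          · simp [List.length_drop]; omega
          · simp [List.length_drop]; omega

-- evaluations of tdfMatch on the literal item list
lemma m_Y4 (t : List Char) : tdfMatch pvI ('Y'::'Y'::'Y'::'Y'::t) = some (pvY4, 4) := rfl

lemma m_DD (t : List Char) : tdfMatch pvI ('D'::'D'::t) = some (pvDD, 2) := rfl

lemma m_MM (t : List Char) : tdfMatch pvI ('M'::'M'::t) = some (pvMM, 2) := rfl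

lemma m_SP (t : List Char) : tdfMatch pvI (' '::t) = some (pvSP, 1) := rfl

lemma m_DOT (t : List Char) : tdfMatch pvI ('.'::t) = some (pvDOT, 1) := rfl

lemma m_YY (t : List Char) (h : t.head? ≠ some 'Y') :
    tdfMatch pvI ('Y'::'Y'::t) = some (pvYY, 2) := by
  have h4 : ("YYYY".toList).isPrefixOf ('Y'::'Y'::t) = false := by
    have hf := pvPrefix_false_of_head 'Y' ['Y'] t h
    simp [List.isPrefixOf, hf]
  simp only [pvI, tdfMatch]
  rw [h4]
  rfl

lemma m_Y1 (t : List Char) (h : t.head? ≠ some 'Y') :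
    tdfMatch pvI ('Y'::t) = none := by
  have h4 : ("YYYY".toList).isPrefixOf ('Y'::t) = false := by
    have hf := pvPrefix_false_of_head 'Y' ['Y','Y'] t h
    simp [List.isPrefixOf, hf]
  have hyy : ("YY".toList).isPrefixOf ('Y'::t) = false := by
    have hf := pvPrefix_false_of_head 'Y' [] t h
    simp [List.isPrefixOf, hf]
  simp only [pvI, tdfMatch]
  rw [h4, hyy]
  rfl

lemma m_D1 (t : List Char) (h : t.head? ≠ some 'D') :
    tdfMatch pvI ('D'::t) = none := by
  have hdd : ("DD".toList).isPrefixOf ('D'::t) = false := by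
    have hf := pvPrefix_false_of_head 'D' [] t h
    simp [List.isPrefixOf, hf]
  simp only [pvI, tdfMatch]
  rw [hdd]
  rfl

lemma m_M1 (t : List Char) (h : t.head? ≠ some 'M') :
    tdfMatch pvI ('M'::t) = none := by
  have hmm : ("MM".toList).isPrefixOf ('M'::t) = false := by
    have hf := pvPrefix_false_of_head 'M' [] t h
    simp [List.isPrefixOf, hf]
  simp only [pvI, tdfMatch]
  rw [hmm]
  rfl

lemma m_other (c : Char) (t : List Char) (hD : c ≠ 'D') (hM : c ≠ 'M') (hY : c ≠ 'Y')
    (hS : c ≠ ' ') (hP : c ≠ '.') : tdfMatch pvI (c::t) = none := by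
  have hy4 := pvPrefix_false_of_head 'Y' ['Y','Y','Y'] (c::t) (by simp; exact fun e => hY e)
  have hdd := pvPrefix_false_of_head 'D' ['D'] (c::t) (by simp; exact fun e => hD e)
  have hmm := pvPrefix_false_of_head 'M' ['M'] (c::t) (by simp; exact fun e => hM e)
  have hyy := pvPrefix_false_of_head 'Y' ['Y'] (c::t) (by simp; exact fun e => hY e)
  have hsp := pvPrefix_false_of_head ' ' [] (c::t) (by simp; exact fun e => hS e)
  have hdot := pvPrefix_false_of_head '.' [] (c::t) (by simp; exact fun e => hP e)
  simp only [pvI, tdfMatch]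
  rw [show ("YYYY".toList).isPrefixOf (c::t) = false from hy4,
      show ("DD".toList).isPrefixOf (c::t) = false from hdd,
      show ("MM".toList).isPrefixOf (c::t) = false from hmm,
      show ("YY".toList).isPrefixOf (c::t) = false from hyy,
      show (" ".toList).isPrefixOf (c::t) = false from hsp,
      show (".".toList).isPrefixOf (c::t) = false from hdot]
  rfl

-- B step lemmas
lemma B_nil : pvB [] = [] := rfl

lemma B_Y4 (t : List Char) : pvB ('Y'::'Y'::'Y'::'Y'::t) = pvY4 ++ pvB t := by
  unfold pvB
  have hl : ('Y'::'Y'::'Y'::'Y'::t).length = (t.length + 3) + 1 := by simp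
  rw [hl, tdfGo_some pvI (t.length+3) _ _ _ _ (m_Y4 t)]
  congr 1
  exact pvB_fuel (t.length+3) t.length t (by simp) le_rfl

lemma B_DD (t : List Char) : pvB ('D'::'D'::t) = pvDD ++ pvB t := by
  unfold pvB
  have hl : ('D'::'D'::t).length = (t.length + 1) + 1 := by simp
  rw [hl, tdfGo_some pvI (t.length+1) _ _ _ _ (m_DD t)]
  congr 1
  exact pvB_fuel (t.length+1) t.length t (by simp) le_rfl

lemma B_MM (t : List Char) : pvB ('M'::'M'::t) = pvMM ++ pvB t := by
  unfold pvB
  have hl : ('M'::'M'::t).length = (t.length + 1) + 1 := by simp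
  rw [hl, tdfGo_some pvI (t.length+1) _ _ _ _ (m_MM t)]
  congr 1
  exact pvB_fuel (t.length+1) t.length t (by simp) le_rfl

lemma B_YY (t : List Char) (h : t.head? ≠ some 'Y') : pvB ('Y'::'Y'::t) = pvYY ++ pvB t := by
  unfold pvB
  have hl : ('Y'::'Y'::t).length = (t.length + 1) + 1 := by simp
  rw [hl, tdfGo_some pvI (t.length+1) _ _ _ _ (m_YY t h)]
  congr 1
  exact pvB_fuel (t.length+1) t.length t (by simp) le_rfl

lemma B_YYY (t : List Char) (h : t.head? ≠ some 'Y') :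
    pvB ('Y'::'Y'::'Y'::t) = pvYY ++ 'Y' :: pvB t := by
  unfold pvB
  have hl : ('Y'::'Y'::'Y'::t).length = (t.length + 2) + 1 := by simp
  rw [hl, tdfGo_some pvI (t.length+2) 'Y' ('Y'::'Y'::t) pvYY 2 (by
        -- YYYY fails only because t does not start with 'Y'; then YY matches
        have h4 : ("YYYY".toList).isPrefixOf ('Y'::'Y'::'Y'::t) = false := by
          have hf := pvPrefix_false_of_head 'Y' [] t h
          simp [List.isPrefixOf, hf]
        simp only [pvI, tdfMatch]
        rw [h4]
        rfl)]
  rw [show List.drop 2 ('Y'::'Y'::'Y'::t) = 'Y'::t from rfl]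
  rw [tdfGo_none pvI (t.length+1) _ _ (m_Y1 t h)]
  rw [pvB_fuel (t.length+1) t.length t (by simp) le_rfl]

lemma B_Y1 (t : List Char) (h : t.head? ≠ some 'Y') : pvB ('Y'::t) = 'Y' :: pvB t := by
  unfold pvB
  have hl : ('Y'::t).length = t.length + 1 := by simp
  rw [hl, tdfGo_none pvI t.length _ _ (m_Y1 t h)]

lemma B_D1 (t : List Char) (h : t.head? ≠ some 'D') : pvB ('D'::t) = 'D' :: pvB t := by
  unfold pvB
  have hl : ('D'::t).length = t.length + 1 := by simp
  rw [hl, tdfGo_none pvI t.length _ _ (m_D1 t h)]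

lemma B_M1 (t : List Char) (h : t.head? ≠ some 'M') : pvB ('M'::t) = 'M' :: pvB t := by
  unfold pvB
  have hl : ('M'::t).length = t.length + 1 := by simp
  rw [hl, tdfGo_none pvI t.length _ _ (m_M1 t h)]

lemma B_SP (t : List Char) : pvB (' '::t) = pvSP ++ pvB t := by
  unfold pvB
  have hl : (' '::t).length = t.length + 1 := by simp
  rw [hl, tdfGo_some pvI t.length _ _ _ _ (m_SP t)]
  rfl

lemma B_DOT (t : List Char) : pvB ('.'::t) = pvDOT ++ pvB t := by
  unfold pvB
  have hl : ('.'::t).length = t.length + 1 := by simp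
  rw [hl, tdfGo_some pvI t.length _ _ _ _ (m_DOT t)]
  rfl

lemma B_other (c : Char) (t : List Char) (hD : c ≠ 'D') (hM : c ≠ 'M') (hY : c ≠ 'Y')
    (hS : c ≠ ' ') (hP : c ≠ '.') : pvB (c::t) = c :: pvB t := by
  unfold pvB
  have hl : (c::t).length = t.length + 1 := by simp
  rw [hl, tdfGo_none pvI t.length _ _ (m_other c t hD hM hY hS hP)]

-- ---- the main induction ----

lemma pvMain : ∀ (n : Nat) (l : List Char), l.length ≤ n → pvA l = pvB l := by
  intro n
  induction n with
  | zero =>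
    intro l h
    have hl : l = [] := List.eq_nil_of_length_eq_zero (Nat.le_zero.mp h)
    subst hl
    rw [A_nil, B_nil]
  | succ n ih =>
    intro l h
    cases l with
    | nil => rw [A_nil, B_nil]
    | cons c t =>
      by_cases hD : c = 'D'
      · subst hD
        cases t with
        | nil =>
          rw [A_D1 [] (by simp), B_D1 [] (by simp), ih [] (by simp)]
        | cons c2 t2 =>
          by_cases h2 : c2 = 'D'
          · subst h2
            rw [A_DD t2, B_DD t2, ih t2 (by simp at h ⊢; omega)]
          · rw [A_D1 (c2::t2) (by simp [h2]), B_D1 (c2::t2) (by simp [h2]),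
               ih (c2::t2) (by simp at h ⊢; omega)]
      · by_cases hM : c = 'M'
        · subst hM
          cases t with
          | nil =>
            rw [A_M1 [] (by simp), B_M1 [] (by simp), ih [] (by simp)]
          | cons c2 t2 =>
            by_cases h2 : c2 = 'M'
            · subst h2
              rw [A_MM t2, B_MM t2, ih t2 (by simp at h ⊢; omega)]
            · rw [A_M1 (c2::t2) (by simp [h2]), B_M1 (c2::t2) (by simp [h2]),
                 ih (c2::t2) (by simp at h ⊢; omega)]
        · by_cases hY : c = 'Y'
          · subst hY
            cases t with
            | nil =>
              rw [A_Y1 [] (by simp), B_Y1 [] (by simp), ih [] (by simp)]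
            | cons c2 t2 =>
              by_cases h2 : c2 = 'Y'
              · subst h2
                cases t2 with
                | nil =>
                  rw [A_YY [] (by simp), B_YY [] (by simp), ih [] (by simp)]
                | cons c3 t3 =>
                  by_cases h3 : c3 = 'Y'
                  · subst h3
                    cases t3 with
                    | nil =>
                      rw [A_YYY [] (by simp), B_YYY [] (by simp), ih [] (by simp)]
                    | cons c4 t4 =>
                      by_cases h4 : c4 = 'Y'
                      · subst h4
                        rw [A_Y4 t4, B_Y4 t4, ih t4 (by simp at h ⊢; omega)]
                      · rw [A_YYY (c4::t4) (by simp [h4]), B_YYY (c4::t4) (by simp [h4]),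
                           ih (c4::t4) (by simp at h ⊢; omega)]
                  · rw [A_YY (c3::t3) (by simp [h3]), B_YY (c3::t3) (by simp [h3]),
                       ih (c3::t3) (by simp at h ⊢; omega)]
              · rw [A_Y1 (c2::t2) (by simp [h2]), B_Y1 (c2::t2) (by simp [h2]),
                   ih (c2::t2) (by simp at h ⊢; omega)]
          · by_cases hS : c = ' '
            · subst hS
              rw [A_SP t, B_SP t, ih t (by simp at h ⊢; omega)]
            · by_cases hP : c = '.'
              · subst hP
                rw [A_DOT t, B_DOT t, ih t (by simp at h ⊢; omega)]
              · rw [A_other c t hD hM hY hS hP, B_other c t hD hM hY hS hP,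
                   ih t (by simp at h ⊢; omega)]

-- ===== VERDICT (by name: the statement is the Claim_ definition above) =====
theorem transform_date_format_in_pattern_py_spec : Claim_equal_transform_date_format_in_pattern_py := by
  intro df _
  unfold Spec_transform_date_format_in_pattern_py
  apply String.toList_inj.mp
  rw [pvA_eq, pvB_eq]
  exact pvMain df.toList.length df.toList le_rfl
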